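-- pv_equiv track=rewrite | github.com/nhansp/xml_to_dependencies | app.py | format_dict_logic
-- ===== SOURCE A (Python) =====
-- KNOWN_REMOTES = {
--     "github-non-los": "https://github.com",
--     "gitlab": "https://gitlab.com",
--     "bitbucket": "https://bitbucket.org",
--     "aosp": "https://android.googlesource.com",
--     "github": "..", # This might need special handling or clarification if base URL changes
--     "private": "ssh://git@github.com",
--     "evo": "https://github.com/Evolution-X",
--     "evo-devices": "https://github.com/Evolution-X-Devices",
--     "evo-bitbucket": "https://bitbucket.com/evo-x",
--     "evo-main": "https://git.mainlining.org/EvolutionX",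
--     "evo-gitlab": "https://gitlab.com/EvoX",
--     "evo-codeberg": "https://codeberg.org/Evolution-X",
-- }
--
-- def sort_dict_logic(d: dict) -> dict:
--     ord_keys = [
--         'repository',
--         'target_path',
--         'branch',
--         'remote',
--         'clone_depth'
--     ]
--     u = {}
--     for k in ord_keys:
--         if k in d:
--             u[k] = d[k]
--     # Add any other keys that were not in ord_keys but were in d
--     for k in d:
--         if k not in u:
--             u[k] = d[k]
--     return u
--
-- def format_dict_logic(d: dict, current_xml_remotes: dict) -> dict:
--     p = {
--         'name': 'repository',
--         'path': 'target_path',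
--         'remote': 'remote',
--         'revision': 'branch',
--         'clone-depth': 'clone_depth'
--     }
--     ans = {}
--     for x_key_original, x_val in d.items():
--         if x_key_original in p.keys():
--             new_key = p[x_key_original]
--             if x_key_original == 'remote':
--                 remote_name_in_project = x_val
--                 # Case 1: The remote attribute in <project> refers to a <remote> tag defined in the XML
--                 if remote_name_in_project in current_xml_remotes:
--                     fetch_url = current_xml_remotes[remote_name_in_project]
--                     found_known_shortname = False
--                     for known_shortname, known_url in KNOWN_REMOTES.items():
--                         if fetch_url == known_url:
--                             ans[new_key] = known_shortname
--                             found_known_shortname = True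
--                             break
--                     if not found_known_shortname:
--                         ans[new_key] = remote_name_in_project # Use the name from XML's <remote name="this_name">
--                 # Case 2: The remote attribute in <project> refers directly to a KNOWN_REMOTES shortname
--                 elif remote_name_in_project in KNOWN_REMOTES:
--                     ans[new_key] = remote_name_in_project
--                 # Case 3: Unknown remote
--                 else:
--                     ans[new_key] = '!!!!!!idk_remote_not_in_xml_or_known_remotes'
--             else:
--                 ans[new_key] = x_val
--         # Keep other attributes not in p as they are (e.g. 'groups')
--         # else:
--         #     ans[x_key_original] = x_val # If you want to keep ALL original attributes
--                                       # Your original SortDict would filter them out unless added to ord_keys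
--     return sort_dict_logic(ans)
-- ===== SOURCE B (Python) =====
-- KNOWN_REMOTES = {
--     "github-non-los": "https://github.com",
--     "gitlab": "https://gitlab.com",
--     "bitbucket": "https://bitbucket.org",
--     "aosp": "https://android.googlesource.com",
--     "github": "..",
--     "private": "ssh://git@github.com",
--     "evo": "https://github.com/Evolution-X",
--     "evo-devices": "https://github.com/Evolution-X-Devices",
--     "evo-bitbucket": "https://bitbucket.com/evo-x",
--     "evo-main": "https://git.mainlining.org/EvolutionX",
--     "evo-gitlab": "https://gitlab.com/EvoX",
--     "evo-codeberg": "https://codeberg.org/Evolution-X",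
-- }
--
-- # URL -> first shortname with that URL, built once.
-- _URL_TO_SHORT = {}
-- for _short, _url in KNOWN_REMOTES.items():
--     if _url not in _URL_TO_SHORT:
--         _URL_TO_SHORT[_url] = _short
--
-- # output key (in final order) -> source attribute in the XML project dict
-- _SRC_OF = (
--     ('repository', 'name'),
--     ('target_path', 'path'),
--     ('branch', 'revision'),
--     ('remote', 'remote'),
--     ('clone_depth', 'clone-depth'),
-- )
--
-- def format_dict_logic(d: dict, current_xml_remotes: dict) -> dict:
--     out = {}
--     for out_key, src in _SRC_OF:
--         if src not in d:
--             continue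
--         val = d[src]
--         if out_key == 'remote':
--             if val in current_xml_remotes:
--                 val = _URL_TO_SHORT.get(current_xml_remotes[val], val)
--             elif val not in KNOWN_REMOTES:
--                 val = '!!!!!!idk_remote_not_in_xml_or_known_remotes'
--         out[out_key] = val
--     return out
-- ===== Notes on version B (the rewrite author's own statement) =====
-- stated objective: simpler
-- what changed: B drops A's remap-then-sort two-pass structure: it iterates once over the fixed output key order with a precomputed inverse key map and a prebuilt URL-to-shortname reverse dict, emitting directly in final order, so A's inner linear scan of KNOWN_REMOTES and the whole sort_dict_logic pass disappear.
import Mathlib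
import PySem

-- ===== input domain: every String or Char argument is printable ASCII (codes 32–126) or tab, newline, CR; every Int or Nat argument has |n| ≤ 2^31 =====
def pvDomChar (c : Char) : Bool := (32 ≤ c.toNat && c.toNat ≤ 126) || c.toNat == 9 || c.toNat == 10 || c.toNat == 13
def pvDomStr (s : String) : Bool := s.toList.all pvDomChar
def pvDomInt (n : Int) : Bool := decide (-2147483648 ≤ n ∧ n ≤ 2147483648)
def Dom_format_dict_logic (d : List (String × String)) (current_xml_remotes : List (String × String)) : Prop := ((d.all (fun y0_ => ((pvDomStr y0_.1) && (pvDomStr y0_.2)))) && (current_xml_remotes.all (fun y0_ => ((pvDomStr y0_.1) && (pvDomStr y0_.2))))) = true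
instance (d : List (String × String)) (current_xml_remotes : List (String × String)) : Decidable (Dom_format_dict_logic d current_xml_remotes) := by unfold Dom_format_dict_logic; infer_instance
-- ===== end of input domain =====

-- B replaces A's iterate-remap-then-sort (two passes plus an inner linear scan of KNOWN_REMOTES
-- per remote) by a single pass over the fixed output order with a prebuilt URL→shortname reverse
-- dict (objective: simpler).

-- ===== PORT A =====
-- module-level constant KNOWN_REMOTES (a dict literal; its items in source order)
def pvKnownRemotes : List (String × String) :=
  [("github-non-los", "https://github.com"),
   ("gitlab", "https://gitlab.com"),
   ("bitbucket", "https://bitbucket.org"),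
   ("aosp", "https://android.googlesource.com"),
   ("github", ".."),
   ("private", "ssh://git@github.com"),
   ("evo", "https://github.com/Evolution-X"),
   ("evo-devices", "https://github.com/Evolution-X-Devices"),
   ("evo-bitbucket", "https://bitbucket.com/evo-x"),
   ("evo-main", "https://git.mainlining.org/EvolutionX"),
   ("evo-gitlab", "https://gitlab.com/EvoX"),
   ("evo-codeberg", "https://codeberg.org/Evolution-X")]

-- the dict literal p
def pvP : PySem.Dict String String :=
  PySem.Dict.mk [("name", "repository"), ("path", "target_path"), ("remote", "remote"),
                 ("revision", "branch"), ("clone-depth", "clone_depth")]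

-- 'for known_shortname, known_url in KNOWN_REMOTES.items(): if fetch_url == known_url: …; break'
def pvScanKnown : List (String × String) → String → Option String
  | [], _ => none
  | (short, url) :: rest, fetch => if fetch == url then some short else pvScanKnown rest fetch

def pvOrdKeys : List String := ["repository", "target_path", "branch", "remote", "clone_depth"]

def sort_dict_logic (dd : PySem.Dict String String) : PySem.Dict String String :=
  let u := pvOrdKeys.foldl
    (fun u k => if dd.contains k then u.insert k (dd.getD k "") else u) PySem.Dict.empty
  dd.keys.foldl (fun u k => if u.contains k then u else u.insert k (dd.getD k "")) u

-- body of A's 'for x_key_original, x_val in d.items()' loop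
def pvStepA (current_xml_remotes : List (String × String))
    (ans : PySem.Dict String String) (kv : String × String) : PySem.Dict String String :=
  match pvP.get? kv.1 with
  | none => ans
  | some new_key =>
    if kv.1 == "remote" then
      match (PySem.Dict.mk current_xml_remotes).get? kv.2 with
      | some fetch_url =>
        match pvScanKnown pvKnownRemotes fetch_url with
        | some short => ans.insert new_key short
        | none => ans.insert new_key kv.2
      | none =>
        if (PySem.Dict.mk pvKnownRemotes).contains kv.2 then ans.insert new_key kv.2
        else ans.insert new_key "!!!!!!idk_remote_not_in_xml_or_known_remotes"
    else ans.insert new_key kv.2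

def format_dict_logic (d : List (String × String)) (current_xml_remotes : List (String × String)) : List (String × String) :=
  (sort_dict_logic (d.foldl (pvStepA current_xml_remotes) PySem.Dict.empty)).items

-- ===== PORT B =====
-- module-level reverse dict _URL_TO_SHORT (first shortname per URL wins)
def pvUrlToShort : PySem.Dict String String :=
  pvKnownRemotes.foldl (fun m p => if m.contains p.2 then m else m.insert p.2 p.1) PySem.Dict.empty

-- module-level tuple _SRC_OF: output key (final order) ↦ source attribute
def pvSrcOf : List (String × String) :=
  [("repository", "name"), ("target_path", "path"), ("branch", "revision"),
   ("remote", "remote"), ("clone_depth", "clone-depth")]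

def format_dict_logic_alt (d : List (String × String)) (current_xml_remotes : List (String × String)) : List (String × String) :=
  pvSrcOf.foldl (fun out ks =>
    match (PySem.Dict.mk d).get? ks.2 with
    | none => out
    | some v =>
      let val := if ks.1 == "remote" then
          match (PySem.Dict.mk current_xml_remotes).get? v with
          | some url => pvUrlToShort.getD url v
          | none =>
            if (PySem.Dict.mk pvKnownRemotes).contains v then v
            else "!!!!!!idk_remote_not_in_xml_or_known_remotes"
        else v
      out ++ [(ks.1, val)]) []

-- ===== PRECONDITION & SPEC =====
-- Pre_ excludes association lists whose keys repeat: they denote no Python dict (the argument d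
-- is a dict, whose keys are unique), so neither behaviour there corresponds to a Python run.
def pvNodupKeys : List (String × String) → Bool
  | [] => true
  | (k, _) :: rest => !(rest.any (fun p => p.1 == k)) && pvNodupKeys rest
def Pre_format_dict_logic (d : List (String × String)) (current_xml_remotes : List (String × String)) : Prop :=
  pvNodupKeys d = true
instance (d : List (String × String)) (current_xml_remotes : List (String × String)) : Decidable (Pre_format_dict_logic d current_xml_remotes) := by unfold Pre_format_dict_logic; infer_instance
def pvWitness_format_dict_logic : (List (String × String)) × (List (String × String)) :=
  ([("name", "frameworks/base"), ("path", "fw/base"), ("remote", "aosp")],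
   [("aosp", "https://android.googlesource.com")])

def Spec_format_dict_logic (d : List (String × String)) (current_xml_remotes : List (String × String)) (out : List (String × String)) : Prop := out = format_dict_logic_alt d current_xml_remotes
instance (d : List (String × String)) (current_xml_remotes : List (String × String)) (out : List (String × String)) : Decidable (Spec_format_dict_logic d current_xml_remotes out) := by unfold Spec_format_dict_logic; infer_instance

-- ===== CLAIM (what is proved, stated in full; the proofs are below) =====
def Claim_equal_format_dict_logic : Prop := ∀ (d : List (String × String)) (current_xml_remotes : List (String × String)), Dom_format_dict_logic d current_xml_remotes → Pre_format_dict_logic d current_xml_remotes → Spec_format_dict_logic d current_xml_remotes (format_dict_logic d current_xml_remotes)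

-- ===== LEMMAS AND PROOFS =====

theorem pvNodupKeys_nodup : ∀ d : List (String × String),
    pvNodupKeys d = true → (d.map Prod.fst).Nodup := by
  intro d
  induction d with
  | nil => intro _; simp
  | cons kv rest ih =>
    intro h
    simp only [pvNodupKeys, Bool.and_eq_true, Bool.not_eq_true', List.any_eq_false,
      beq_iff_eq] at h
    obtain ⟨h1, h2⟩ := h
    simp only [List.map_cons, List.nodup_cons]
    refine ⟨?_, ih h2⟩
    simp only [List.mem_map]
    rintro ⟨p, hp, hpk⟩
    exact h1 p hp hpk

theorem pv_get?_mk_nil (k : String) :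
    (PySem.Dict.mk ([] : List (String × String))).get? k = none := rfl

theorem pv_items_empty : (PySem.Dict.empty : PySem.Dict String String).items = [] := rfl

-- the value A stores for source key src with value v (A's remote normalisation inlined)
def pvRemap (cur : List (String × String)) (src v : String) : String :=
  if src == "remote" then
    match (PySem.Dict.mk cur).get? v with
    | some fetch_url =>
      match pvScanKnown pvKnownRemotes fetch_url with
      | some short => short
      | none => v
    | none =>
      if (PySem.Dict.mk pvKnownRemotes).contains v then v
      else "!!!!!!idk_remote_not_in_xml_or_known_remotes"
  else v

theorem pvStepA_eq (cur : List (String × String)) (ans : PySem.Dict String String)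
    (kv : String × String) :
    pvStepA cur ans kv =
      match pvP.get? kv.1 with
      | none => ans
      | some nk => ans.insert nk (pvRemap cur kv.1 kv.2) := by
  unfold pvStepA pvRemap
  cases pvP.get? kv.1 with
  | none => rfl
  | some nk =>
    cases h : (kv.1 == "remote") with
    | false => simp
    | true =>
      simp only [if_true]
      cases hc : (PySem.Dict.mk cur).get? kv.2 with
      | none => split_ifs <;> rfl
      | some fetch =>
        show (match pvScanKnown pvKnownRemotes fetch with
              | some short => ans.insert nk short
              | none => ans.insert nk kv.2) =
            ans.insert nk (match pvScanKnown pvKnownRemotes fetch with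
              | some short => short
              | none => kv.2)
        cases pvScanKnown pvKnownRemotes fetch <;> rfl

theorem pvP_get?_mem (k o : String) (h : pvP.get? k = some o) :
    (k, o) ∈ ([("name", "repository"), ("path", "target_path"), ("remote", "remote"),
               ("revision", "branch"), ("clone-depth", "clone_depth")] : List (String × String)) := by
  simp only [pvP, PySem.Dict.get?_mk_cons, pv_get?_mk_nil, beq_iff_eq] at h
  split_ifs at h with h1 h2 h3 h4 h5 <;> simp_all

theorem pvP_val_mem (k o : String) (h : pvP.get? k = some o) : o ∈ pvOrdKeys := by
  have hm := pvP_get?_mem k o h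
  simp only [List.mem_cons, List.not_mem_nil, or_false, Prod.mk.injEq] at hm
  rcases hm with ⟨h1, rfl⟩ | ⟨h1, rfl⟩ | ⟨h1, rfl⟩ | ⟨h1, rfl⟩ | ⟨h1, rfl⟩ <;> simp [pvOrdKeys]

theorem pvP_inj (src out : String) (hso : pvP.get? src = some out)
    (k o : String) (h : pvP.get? k = some o) (hk : k ≠ src) : o ≠ out := by
  have hm := pvP_get?_mem k o h
  have hm' := pvP_get?_mem src out hso
  simp only [List.mem_cons, List.not_mem_nil, or_false, Prod.mk.injEq] at hm hm'
  rcases hm with ⟨h1, rfl⟩ | ⟨h1, rfl⟩ | ⟨h1, rfl⟩ | ⟨h1, rfl⟩ | ⟨h1, rfl⟩ <;>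
    rcases hm' with ⟨h2, rfl⟩ | ⟨h2, rfl⟩ | ⟨h2, rfl⟩ | ⟨h2, rfl⟩ | ⟨h2, rfl⟩ <;> simp_all

theorem pvFoldA_get? (cur : List (String × String)) (src out : String)
    (hso : pvP.get? src = some out) :
    ∀ (d : List (String × String)) (ans : PySem.Dict String String),
    (d.map Prod.fst).Nodup →
    (d.foldl (pvStepA cur) ans).get? out =
      ((PySem.Dict.mk d).get? src).elim (ans.get? out) (fun v => some (pvRemap cur src v)) := by
  intro d
  induction d with
  | nil => intro ans _; simp [pv_get?_mk_nil]
  | cons kv rest ih =>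
    intro ans h
    simp only [List.map_cons, List.nodup_cons] at h
    obtain ⟨hhead, htail⟩ := h
    simp only [List.foldl_cons]
    rw [ih _ htail, PySem.Dict.get?_mk_cons]
    by_cases hk : kv.1 = src
    · have hr : (PySem.Dict.mk rest).get? src = none := by
        rw [PySem.Dict.get?_eq_none_iff_not_mem_keys]
        simpa [PySem.Dict.keys_mk, hk] using hhead
      rw [hr]
      simp only [hk, beq_self_eq_true, if_true, Option.elim]
      rw [pvStepA_eq]
      have : pvP.get? kv.1 = some out := by rw [hk, hso]
      rw [this, hk, PySem.Dict.get?_insert_self]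
    · have hb : (kv.1 == src) = false := beq_eq_false_iff_ne.mpr hk
      rw [hb]
      simp only [Bool.false_eq_true, if_false]
      cases hrest : (PySem.Dict.mk rest).get? src with
      | some v => simp
      | none =>
        simp only [Option.elim]
        rw [pvStepA_eq]
        cases hp : pvP.get? kv.1 with
        | none => rfl
        | some nk =>
          rw [PySem.Dict.get?_insert, if_neg (pvP_inj src out hso kv.1 nk hp hk).symm]

theorem pvFoldA_keys (cur : List (String × String)) :
    ∀ (d : List (String × String)) (ans : PySem.Dict String String),
    (∀ k ∈ ans.keys, k ∈ pvOrdKeys) →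
    ∀ k ∈ (d.foldl (pvStepA cur) ans).keys, k ∈ pvOrdKeys := by
  intro d
  induction d with
  | nil => intro ans h; simpa using h
  | cons kv rest ih =>
    intro ans h
    simp only [List.foldl_cons]
    apply ih
    intro k hk
    rw [pvStepA_eq] at hk
    cases hp : pvP.get? kv.1 with
    | none => rw [hp] at hk; exact h k hk
    | some nk =>
      rw [hp] at hk
      rcases (PySem.Dict.mem_keys_insert _ _ _ _).mp hk with rfl | hk'
      · exact pvP_val_mem kv.1 k hp
      · exact h k hk'

theorem pvFoldl_contained_id (u : PySem.Dict String String)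
    (f : PySem.Dict String String → String → PySem.Dict String String) :
    ∀ ks : List String, (∀ k ∈ ks, u.contains k = true) →
    ks.foldl (fun u k => if u.contains k then u else f u k) u = u := by
  intro ks
  induction ks with
  | nil => intro _; rfl
  | cons k ks ih =>
    intro h
    simp only [List.foldl_cons]
    rw [if_pos (h k (by simp))]
    exact ih (fun j hj => h j (by simp [hj]))

theorem pvFirstloop_contains (dd : PySem.Dict String String) (k : String)
    (hk : k ∈ pvOrdKeys) (hc : dd.contains k = true) :
    (pvOrdKeys.foldl
      (fun u j => if dd.contains j then u.insert j (dd.getD j "") else u)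
      PySem.Dict.empty).contains k = true := by
  simp only [pvOrdKeys, List.foldl_cons, List.foldl_nil]
  simp only [pvOrdKeys, List.mem_cons, List.not_mem_nil, or_false] at hk
  rcases hk with rfl | rfl | rfl | rfl | rfl <;>
    split_ifs <;> simp_all [PySem.Dict.contains_insert]

theorem pvScanKnown_eq_get?_swap (l : List (String × String)) (u : String) :
    pvScanKnown l u = (PySem.Dict.mk (l.map Prod.swap)).get? u := by
  induction l with
  | nil => rfl
  | cons p rest ih =>
    obtain ⟨short, url⟩ := p
    simp only [pvScanKnown, List.map_cons, Prod.swap, PySem.Dict.get?_mk_cons, ih]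
    by_cases h : u = url
    · simp [h]
    · simp [beq_iff_eq, h, Ne.symm h]

theorem pv_get?_of_contains_false (m : PySem.Dict String String) (k : String)
    (h : m.contains k = false) : m.get? k = none := by
  rw [PySem.Dict.contains_eq_isSome_get?] at h
  exact Option.not_isSome_iff_eq_none.mp (by simp [h])

theorem pvFoldRev_get? :
    ∀ (l : List (String × String)) (m : PySem.Dict String String) (u : String),
    (l.foldl (fun m p => if m.contains p.2 then m else m.insert p.2 p.1) m).get? u
      = ((m.get? u).orElse (fun _ => (PySem.Dict.mk (l.map Prod.swap)).get? u)) := by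
  intro l
  induction l with
  | nil =>
    intro m u
    cases h : m.get? u <;> simp [h, pv_get?_mk_nil, Option.orElse]
  | cons p rest ih =>
    intro m u
    simp only [List.foldl_cons, List.map_cons, Prod.swap]
    rw [ih, PySem.Dict.get?_mk_cons]
    by_cases h : p.2 = u
    · subst h
      by_cases hc : m.contains p.2
      · obtain ⟨w, hw⟩ : ∃ w, m.get? p.2 = some w := by
          rw [PySem.Dict.contains_eq_isSome_get?] at hc
          exact Option.isSome_iff_exists.mp hc
        simp [hc, hw, Option.orElse]
      · rw [Bool.not_eq_true] at hc
        simp [hc, PySem.Dict.get?_insert_self, pv_get?_of_contains_false m p.2 hc,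
          Option.orElse]
    · have hb : (p.2 == u) = false := by simp [beq_iff_eq, h]
      rw [hb]
      simp only [Bool.false_eq_true, if_false]
      by_cases hc : m.contains p.2
      · simp [hc]
      · rw [Bool.not_eq_true] at hc
        simp only [hc, Bool.false_eq_true, if_false]
        rw [PySem.Dict.get?_insert, if_neg (Ne.symm h)]

theorem pvScan_eq_get? (u : String) :
    pvScanKnown pvKnownRemotes u = pvUrlToShort.get? u := by
  rw [pvScanKnown_eq_get?_swap]
  unfold pvUrlToShort
  rw [pvFoldRev_get?]
  simp [PySem.Dict.get?_empty, Option.orElse]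

theorem pvRemap_remote (cur : List (String × String)) (v : String) :
    pvRemap cur "remote" v =
      (match (PySem.Dict.mk cur).get? v with
       | some url => pvUrlToShort.getD url v
       | none =>
         if (PySem.Dict.mk pvKnownRemotes).contains v then v
         else "!!!!!!idk_remote_not_in_xml_or_known_remotes") := by
  unfold pvRemap
  simp only [beq_self_eq_true, if_true]
  cases h : (PySem.Dict.mk cur).get? v with
  | none => rfl
  | some fetch =>
    show (match pvScanKnown pvKnownRemotes fetch with
          | some short => short
          | none => v) = pvUrlToShort.getD fetch v
    rw [pvScan_eq_get?, PySem.Dict.getD_eq_get?_getD]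
    cases pvUrlToShort.get? fetch <;> rfl

theorem pvRemap_other (cur : List (String × String)) (src v : String) (h : src ≠ "remote") :
    pvRemap cur src v = v := by
  unfold pvRemap
  rw [beq_eq_false_iff_ne.mpr h]
  rfl

-- the value B stores for the output/source pair ks with source value v (B's loop body value)
def pvBVal (cur : List (String × String)) (ks : String × String) (v : String) : String :=
  if ks.1 == "remote" then
    match (PySem.Dict.mk cur).get? v with
    | some url => pvUrlToShort.getD url v
    | none =>
      if (PySem.Dict.mk pvKnownRemotes).contains v then v
      else "!!!!!!idk_remote_not_in_xml_or_known_remotes"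
  else v

-- B's loop body and the body of sort_dict_logic's first loop, as named functions
def pvBStep (d cur : List (String × String)) (out : List (String × String))
    (ks : String × String) : List (String × String) :=
  match (PySem.Dict.mk d).get? ks.2 with
  | none => out
  | some v => out ++ [(ks.1, pvBVal cur ks v)]

def pvUStep (ans : PySem.Dict String String) (u : PySem.Dict String String) (k : String) :
    PySem.Dict String String :=
  if ans.contains k then u.insert k (ans.getD k "") else u

theorem pvBfold_acc (d cur : List (String × String)) :
    ∀ (pairs : List (String × String)) (acc : List (String × String)),
    pairs.foldl (pvBStep d cur) acc = acc ++ pairs.foldl (pvBStep d cur) [] := by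
  intro pairs
  induction pairs with
  | nil => intro acc; simp
  | cons p rest ih =>
    intro acc
    have hstep : ∀ a, pvBStep d cur a p = a ++ pvBStep d cur [] p := by
      intro a; unfold pvBStep; cases (PySem.Dict.mk d).get? p.2 <;> simp
    calc (p :: rest).foldl (pvBStep d cur) acc
        = rest.foldl (pvBStep d cur) (pvBStep d cur acc p) := rfl
      _ = pvBStep d cur acc p ++ rest.foldl (pvBStep d cur) [] := ih _
      _ = acc ++ (pvBStep d cur [] p ++ rest.foldl (pvBStep d cur) []) := by
            rw [hstep acc, List.append_assoc]
      _ = acc ++ (p :: rest).foldl (pvBStep d cur) [] := by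
            rw [List.foldl_cons, ih (pvBStep d cur [] p)]

theorem pvLoops (d cur : List (String × String)) (ans : PySem.Dict String String) :
    ∀ (pairs : List (String × String)) (u0 : PySem.Dict String String),
    (∀ p ∈ pairs, u0.contains p.1 = false) →
    (pairs.map Prod.fst).Nodup →
    (∀ p ∈ pairs, ans.get? p.1 = ((PySem.Dict.mk d).get? p.2).map (pvBVal cur p)) →
    ((pairs.map Prod.fst).foldl (pvUStep ans) u0).items
      = u0.items ++ pairs.foldl (pvBStep d cur) [] := by
  intro pairs
  induction pairs with
  | nil => intro u0 _ _ _; simp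
  | cons p rest ih =>
    intro u0 hfresh hnd hval
    simp only [List.map_cons, List.nodup_cons] at hnd ⊢
    obtain ⟨hhead, htail⟩ := hnd
    simp only [List.foldl_cons]
    have hv := hval p (by simp)
    cases hq : (PySem.Dict.mk d).get? p.2 with
    | none =>
      rw [hq] at hv
      simp only [Option.map_none] at hv
      have hc : ans.contains p.1 = false := by
        rw [PySem.Dict.contains_eq_isSome_get?, hv]; rfl
      have hu : pvUStep ans u0 p.1 = u0 := by unfold pvUStep; rw [hc]; simp
      have hb : pvBStep d cur [] p = [] := by unfold pvBStep; rw [hq]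
      rw [hu, hb, ih u0 (fun q hq' => hfresh q (by simp [hq'])) htail
            (fun q hq' => hval q (by simp [hq']))]
    | some v =>
      rw [hq] at hv
      simp only [Option.map_some] at hv
      have hc : ans.contains p.1 = true := by
        rw [PySem.Dict.contains_eq_isSome_get?, hv]; rfl
      have hgd : ans.getD p.1 "" = pvBVal cur p v := by
        rw [PySem.Dict.getD_eq_get?_getD, hv]; rfl
      have hu : pvUStep ans u0 p.1 = u0.insert p.1 (pvBVal cur p v) := by
        unfold pvUStep; rw [hc, hgd]; simp
      have hb : pvBStep d cur [] p = [(p.1, pvBVal cur p v)] := by unfold pvBStep; rw [hq]; simp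
      rw [hu, hb]
      have hfresh' : ∀ q ∈ rest, (u0.insert p.1 (pvBVal cur p v)).contains q.1 = false := by
        intro q hq'
        rw [PySem.Dict.contains_insert]
        have : q.1 ≠ p.1 := by
          intro hcontra; exact hhead (hcontra ▸ List.mem_map_of_mem hq')
        simp [beq_iff_eq, this, hfresh q (by simp [hq'])]
      rw [ih _ hfresh' htail (fun q hq' => hval q (by simp [hq']))]
      rw [PySem.Dict.items_insert_of_not_contains _ _ (hfresh p (by simp))]
      rw [pvBfold_acc d cur rest [(p.1, pvBVal cur p v)], List.append_assoc]

theorem pvElim_map (o : Option String) (f : String → String) :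
    o.elim (none : Option String) (fun v => some (f v)) = o.map f := by
  cases o <;> rfl

-- ===== VERDICT (by name: the statement is the Claim_ definition above) =====
theorem format_dict_logic_spec : Claim_equal_format_dict_logic := by
  intro d cur _ hpre
  unfold Spec_format_dict_logic format_dict_logic format_dict_logic_alt sort_dict_logic
  have hpre' : (d.map Prod.fst).Nodup := pvNodupKeys_nodup d hpre
  have h1 := pvFoldA_get? cur "name" "repository" (by decide) d PySem.Dict.empty hpre'
  have h2 := pvFoldA_get? cur "path" "target_path" (by decide) d PySem.Dict.empty hpre'
  have h3 := pvFoldA_get? cur "revision" "branch" (by decide) d PySem.Dict.empty hpre'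
  have h4 := pvFoldA_get? cur "remote" "remote" (by decide) d PySem.Dict.empty hpre'
  have h5 := pvFoldA_get? cur "clone-depth" "clone_depth" (by decide) d PySem.Dict.empty hpre'
  have hkeys := pvFoldA_keys cur d PySem.Dict.empty (by simp [PySem.Dict.keys_empty])
  set ans := d.foldl (pvStepA cur) PySem.Dict.empty with hans
  simp only [PySem.Dict.get?_empty, pvElim_map] at h1 h2 h3 h4 h5
  have hval : ∀ p ∈ pvSrcOf, ans.get? p.1 = ((PySem.Dict.mk d).get? p.2).map (pvBVal cur p) := by
      intro p hp
      simp only [pvSrcOf, List.mem_cons, List.not_mem_nil, or_false] at hp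
      rcases hp with rfl | rfl | rfl | rfl | rfl
      · rw [h1]
        exact Option.map_congr (fun v _ => by
          rw [pvRemap_other cur "name" v (by decide)]
          simp [pvBVal])
      · rw [h2]
        exact Option.map_congr (fun v _ => by
          rw [pvRemap_other cur "path" v (by decide)]
          simp [pvBVal])
      · rw [h3]
        exact Option.map_congr (fun v _ => by
          rw [pvRemap_other cur "revision" v (by decide)]
          simp [pvBVal])
      · rw [h4]
        exact Option.map_congr (fun v _ => by
          rw [pvRemap_remote cur v]
          simp [pvBVal])
      · rw [h5]
        exact Option.map_congr (fun v _ => by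
          rw [pvRemap_other cur "clone-depth" v (by decide)]
          simp [pvBVal])
  rw [pvFoldl_contained_id]
  · show ((pvSrcOf.map Prod.fst).foldl (pvUStep ans) PySem.Dict.empty).items
      = pvSrcOf.foldl (pvBStep d cur) []
    rw [pvLoops d cur ans pvSrcOf PySem.Dict.empty
        (fun p _ => PySem.Dict.contains_empty p.1)
        (by decide) hval]
    rw [pv_items_empty]; rfl
  · intro k hk
    exact pvFirstloop_contains ans k (hkeys k hk)
      ((PySem.Dict.contains_iff_mem_keys _ _).mpr hk)
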